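-- pv_equiv track=rewrite | github.com/raeez/chiral-bar-cobar | compute/lib/vvmf_hecke.py | _inverse_eta_coeffs
-- ===== SOURCE A (Python) =====
-- from typing import Dict, List, Optional, Tuple
--
-- def _inverse_eta_coeffs(num_terms: int) -> List[int]:
--     """Coefficients of 1/prod_{n>=1}(1-q^n) = sum p(k) q^k (partition numbers).
--
--     Uses the recurrence: p(n) = sum_{k>=1} (-1)^{k+1} [p(n-w1(k)) + p(n-w2(k))]
--     where w1(k) = k(3k-1)/2, w2(k) = k(3k+1)/2 are generalized pentagonal numbers.
--     """
--     coeffs = [0] * num_terms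
--     coeffs[0] = 1
--     for n in range(1, num_terms):
--         val = 0
--         for k in range(1, n + 1):
--             p1 = k * (3 * k - 1) // 2
--             p2 = k * (3 * k + 1) // 2
--             sign = (-1) ** (k + 1)
--             if p1 <= n:
--                 val += sign * coeffs[n - p1]
--             if p2 <= n:
--                 val += sign * coeffs[n - p2]
--         coeffs[n] = val
--     return coeffs
-- ===== SOURCE B (Python) =====
-- def _inverse_eta_coeffs(num_terms):
--     # Precompute the generalized pentagonal numbers < num_terms with their signs,
--     # then form each coefficient as one sum over that (short) table.
--     pents = []
--     k = 1
--     while k * (3 * k - 1) // 2 < num_terms: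
--         sign = 1 if k % 2 == 1 else -1
--         pents.append((k * (3 * k - 1) // 2, sign))
--         if k * (3 * k + 1) // 2 < num_terms:
--             pents.append((k * (3 * k + 1) // 2, sign))
--         k += 1
--     coeffs = [0] * num_terms
--     coeffs[0] = 1
--     for n in range(1, num_terms):
--         coeffs[n] = sum(s * coeffs[n - g] for g, s in pents if g <= n)
--     return coeffs
-- ===== Notes on version B (the rewrite author's own statement) =====
-- stated objective: faster
-- what changed: B precomputes the table of generalized pentagonal numbers below num_terms with their signs once, then computes each coefficient as a single sum over that O(sqrt(n))-sized table, instead of A's inner loop over all k = 1..n that recomputes both pentagonal numbers, the sign and two guards per k.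
-- outside the precondition, e.g. on _inverse_eta_coeffs(0): A raises IndexError, B raises IndexError
import Mathlib
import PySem

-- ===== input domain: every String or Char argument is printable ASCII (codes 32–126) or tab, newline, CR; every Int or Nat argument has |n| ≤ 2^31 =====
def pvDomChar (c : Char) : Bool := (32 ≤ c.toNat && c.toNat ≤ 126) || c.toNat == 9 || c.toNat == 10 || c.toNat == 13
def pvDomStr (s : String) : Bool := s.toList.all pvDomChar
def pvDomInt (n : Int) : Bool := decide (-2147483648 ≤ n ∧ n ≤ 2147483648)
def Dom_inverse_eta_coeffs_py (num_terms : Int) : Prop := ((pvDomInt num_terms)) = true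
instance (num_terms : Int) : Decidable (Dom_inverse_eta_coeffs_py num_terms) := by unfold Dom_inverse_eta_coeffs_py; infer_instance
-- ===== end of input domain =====

-- B precomputes the generalized pentagonal numbers below num_terms once, then forms each
-- coefficient as a single sum over that short table (objective: faster; A rescans k = 1..n).
-- All indices and pentagonal values are nonnegative in every executed branch, so the ports
-- use Nat arithmetic, which agrees with Python's // and indexing there.

-- ===== PORT A =====
-- inner loop: for k in range(1, n+1): …
def pentSumA (c : List Int) (n : Nat) : Int :=
  (List.range' 1 n).foldl (fun val k =>
    let p1 := k * (3 * k - 1) / 2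
    let p2 := k * (3 * k + 1) / 2
    let sign : Int := (-1) ^ (k + 1)
    let val := if p1 ≤ n then val + sign * c.getD (n - p1) 0 else val
    if p2 ≤ n then val + sign * c.getD (n - p2) 0 else val) 0

def inverse_eta_coeffs_py (num_terms : Int) : List Int :=
  let N := num_terms.toNat
  let coeffs := (List.replicate N (0 : Int)).set 0 1
  (List.range' 1 (N - 1)).foldl (fun c n => c.set n (pentSumA c n)) coeffs

-- ===== PORT B =====
-- termination helper for the while loop of Source B (cited in decreasing_by)
theorem le_pent1 (k : Nat) : k ≤ k * (3 * k - 1) / 2 := by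
  rcases Nat.eq_zero_or_pos k with h | h
  · simp [h]
  · rw [Nat.le_div_iff_mul_le (by norm_num)]
    exact Nat.mul_le_mul_left k (by omega)

-- the while loop of Source B: k starts at 1, appends (w1(k), sign) and possibly (w2(k), sign)
def pentTable (N : Nat) (k : Nat) : List (Nat × Int) :=
  if k * (3 * k - 1) / 2 < N then
    (k * (3 * k - 1) / 2, if k % 2 = 1 then (1 : Int) else -1) ::
      ((if k * (3 * k + 1) / 2 < N then
          [(k * (3 * k + 1) / 2, if k % 2 = 1 then (1 : Int) else -1)] else []) ++
        pentTable N (k + 1))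
  else []
termination_by N - k
decreasing_by
  have := le_pent1 k
  omega

def inverse_eta_coeffs_py_alt (num_terms : Int) : List Int :=
  let N := num_terms.toNat
  let pents := pentTable N 1
  let coeffs := (List.replicate N (0 : Int)).set 0 1
  (List.range' 1 (N - 1)).foldl (fun c n =>
    c.set n ((pents.filter (fun p => p.1 ≤ n)).foldl
      (fun v p => v + p.2 * c.getD (n - p.1) 0) 0)) coeffs

-- ===== PRECONDITION & SPEC =====
-- Pre_ excludes num_terms ≤ 0, where both A and B raise IndexError on coeffs[0] = 1.
def Pre_inverse_eta_coeffs_py (num_terms : Int) : Prop := 1 ≤ num_terms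
instance (num_terms : Int) : Decidable (Pre_inverse_eta_coeffs_py num_terms) := by
  unfold Pre_inverse_eta_coeffs_py; infer_instance
def pvWitness_inverse_eta_coeffs_py : Int := 6

def Spec_inverse_eta_coeffs_py (num_terms : Int) (out : List Int) : Prop := out = inverse_eta_coeffs_py_alt num_terms
instance (num_terms : Int) (out : List Int) : Decidable (Spec_inverse_eta_coeffs_py num_terms out) := by unfold Spec_inverse_eta_coeffs_py; infer_instance

-- ===== CLAIM (what is proved, stated in full; the proofs are below) =====
def Claim_equal_inverse_eta_coeffs_py : Prop := ∀ (num_terms : Int), Dom_inverse_eta_coeffs_py num_terms → Pre_inverse_eta_coeffs_py num_terms → Spec_inverse_eta_coeffs_py num_terms (inverse_eta_coeffs_py num_terms)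

-- ===== LEMMAS AND PROOFS =====

theorem pent1_mono {j k : Nat} (h : j ≤ k) :
    j * (3 * j - 1) / 2 ≤ k * (3 * k - 1) / 2 :=
  Nat.div_le_div_right (Nat.mul_le_mul h (by omega))

theorem pent1_le_pent2 (k : Nat) : k * (3 * k - 1) / 2 ≤ k * (3 * k + 1) / 2 :=
  Nat.div_le_div_right (Nat.mul_le_mul_left k (by omega))

theorem neg_one_pow_eq (k : Nat) :
    ((-1 : Int)) ^ (k + 1) = if k % 2 = 1 then (1 : Int) else -1 := by
  rcases Nat.even_or_odd k with h | h
  · rw [Odd.neg_one_pow (Even.add_one h)]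
    simp [Nat.even_iff.mp h]
  · rw [Even.neg_one_pow (Odd.add_one h)]
    simp [Nat.odd_iff.mp h]

theorem foldl_id {α β : Type} (l : List β) (f : α → β → α)
    (h : ∀ a x, x ∈ l → f a x = a) : ∀ v : α, l.foldl f v = v := by
  induction l with
  | nil => intro v; rfl
  | cons x t ih =>
    intro v
    rw [List.foldl_cons, h v x (List.mem_cons_self), ih]
    intro a y hy; exact h a y (List.mem_cons_of_mem _ hy)

-- the core equivalence: B's sum over the filtered pentagonal table from k equals
-- A's guarded inner loop over k, k+1, …, n
theorem core (N : Nat) (c : List Int) (n : Nat) (hn : n < N) :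
    ∀ k v0, ((pentTable N k).filter (fun p => p.1 ≤ n)).foldl
        (fun v p => v + p.2 * c.getD (n - p.1) 0) v0
      = (List.range' k (n + 1 - k)).foldl (fun val k' =>
          let p1 := k' * (3 * k' - 1) / 2
          let p2 := k' * (3 * k' + 1) / 2
          let sign : Int := (-1) ^ (k' + 1)
          let val := if p1 ≤ n then val + sign * c.getD (n - p1) 0 else val
          if p2 ≤ n then val + sign * c.getD (n - p2) 0 else val) v0 := by
  intro k
  induction k using pentTable.induct N with
  | case1 k h ih =>
    intro v0
    rw [pentTable]
    simp only [if_pos h, List.filter_cons, List.filter_append]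
    by_cases h1 : k * (3 * k - 1) / 2 ≤ n
    · -- head survives the filter; the A loop body takes its first branch at k
      have hk : k ≤ n := le_trans (le_pent1 k) h1
      have hrange : n + 1 - k = (n - k) + 1 := by omega
      rw [hrange, List.range'_succ, List.foldl_cons]
      simp only [decide_eq_true_eq, if_pos h1, List.foldl_cons]
      by_cases h2 : k * (3 * k + 1) / 2 ≤ n
      · have h2' : k * (3 * k + 1) / 2 < N := lt_of_le_of_lt h2 hn
        simp only [if_pos h2', List.filter_cons, decide_eq_true_eq, if_pos h2,
          List.filter_nil]
        have hnk : n - k = n + 1 - (k + 1) := by omega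
        rw [hnk, ← ih]
        simp [neg_one_pow_eq]
      · -- the w2 entry (present or not) is filtered out
        have htl : (if k * (3 * k + 1) / 2 < N then
            [(k * (3 * k + 1) / 2, if k % 2 = 1 then (1 : Int) else -1)] else
            []).filter (fun p => p.1 ≤ n) = [] := by
          split <;> simp [h2]
        rw [htl, List.nil_append]
        have hnk : n - k = n + 1 - (k + 1) := by omega
        rw [hnk, ← ih]
        simp [neg_one_pow_eq, h2]
    · -- w1(k) > n: everything from k on is filtered out of B, and contributes 0 in A
      have h2 : ¬ k * (3 * k + 1) / 2 ≤ n :=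
        fun hle => h1 (le_trans (pent1_le_pent2 k) hle)
      have htl : (if k * (3 * k + 1) / 2 < N then
          [(k * (3 * k + 1) / 2, if k % 2 = 1 then (1 : Int) else -1)] else
          []).filter (fun p => p.1 ≤ n) = [] := by
        split <;> simp [h2]
      simp only [decide_eq_true_eq, if_neg h1, htl, List.nil_append]
      rw [ih]
      by_cases hk : k ≤ n
      · have hrange : n + 1 - k = (n - k) + 1 := by omega
        rw [hrange, List.range'_succ, List.foldl_cons]
        simp only [if_neg h1, if_neg h2]
        have hnk : n - k = n + 1 - (k + 1) := by omega
        rw [hnk]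
      · have hz : n + 1 - k = 0 := by omega
        have hz' : n + 1 - (k + 1) = 0 := by omega
        rw [hz, hz']
        simp
  | case2 k h =>
    intro v0
    rw [pentTable, if_neg h]
    simp only [List.filter_nil, List.foldl_nil]
    refine (foldl_id _ _ ?_ v0).symm
    intro a j hj
    have hjk : k ≤ j := (List.mem_range'_1.mp hj).1
    have hj1 : ¬ j * (3 * j - 1) / 2 ≤ n := by
      intro hle
      exact h (lt_of_le_of_lt (le_trans (pent1_mono hjk) hle) hn)
    have hj2 : ¬ j * (3 * j + 1) / 2 ≤ n :=
      fun hle => hj1 (le_trans (pent1_le_pent2 j) hle)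
    simp [hj1, hj2]

theorem inner_eq (N : Nat) (c : List Int) (n : Nat) (hn : n < N) :
    ((pentTable N 1).filter (fun p => p.1 ≤ n)).foldl
        (fun v p => v + p.2 * c.getD (n - p.1) 0) 0 = pentSumA c n := by
  have := core N c n hn 1 0
  simpa [pentSumA] using this

-- ===== VERDICT (by name: the statement is the Claim_ definition above) =====
theorem inverse_eta_coeffs_py_spec : Claim_equal_inverse_eta_coeffs_py := by
  intro num_terms _ hpre
  unfold Spec_inverse_eta_coeffs_py inverse_eta_coeffs_py inverse_eta_coeffs_py_alt
  dsimp only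
  refine Eq.symm (PySem.List.foldl_congr_mem _ _ _ _ ?_)
  intro c n hn
  have hnN : n < num_terms.toNat := by
    have h := (List.mem_range'_1.mp hn).2
    have hN : 1 ≤ num_terms.toNat := by
      unfold Pre_inverse_eta_coeffs_py at hpre; omega
    omega
  rw [inner_eq num_terms.toNat c n hnN]
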